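-- pv_equiv track=rewrite | github.com/watanka/BOJ | 프로그래머스/lv1/1845. 폰켓몬/폰켓몬.py | solution
-- ===== SOURCE A (Python) =====
-- def solution(nums):
--     ponket_dict = {}
--     for species in nums :
--         if species not in ponket_dict.keys() :
--             ponket_dict[species] = 1
--         else :
--             ponket_dict[species] += 1
--     answer = min(len(ponket_dict), len(nums) // 2)
--
--     return answer
-- ===== SOURCE B (Python) =====
-- def solution(nums):
--     ordered = sorted(nums)
--     distinct = 0
--     prev = None
--     for x in ordered:
--         if prev is None or x != prev:
--             distinct += 1
--         prev = x
--     return min(distinct, len(nums) // 2)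
-- ===== Notes on version B (the rewrite author's own statement) =====
-- stated objective: alternative
-- what changed: Replaces the hash-table frequency dict with sort-then-scan: sort the list and count positions where the value changes, which yields the distinct count without any dict.
import Mathlib
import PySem

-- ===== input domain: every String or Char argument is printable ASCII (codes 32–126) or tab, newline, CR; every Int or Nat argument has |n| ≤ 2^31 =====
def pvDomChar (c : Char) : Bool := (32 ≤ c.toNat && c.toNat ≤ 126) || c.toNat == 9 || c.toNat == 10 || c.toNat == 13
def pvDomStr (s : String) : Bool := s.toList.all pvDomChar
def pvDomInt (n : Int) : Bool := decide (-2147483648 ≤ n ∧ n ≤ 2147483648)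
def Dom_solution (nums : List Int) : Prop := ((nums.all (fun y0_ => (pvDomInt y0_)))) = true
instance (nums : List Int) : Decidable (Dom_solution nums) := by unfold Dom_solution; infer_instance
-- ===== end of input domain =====

-- B replaces A's frequency dict with sort-then-scan distinct counting (alternative decomposition, not claimed faster).

-- ===== PORT A =====
def solution (nums : List Int) : Int :=
  let d := nums.foldl
    (fun d species =>
      if d.contains species = false then d.insert species 1
      else d.insert species (d.getD species 0 + 1))
    (PySem.Dict.empty : PySem.Dict Int Int)
  min (d.size : Int) (PySem.Int.floordiv (nums.length : Int) 2)

-- ===== PORT B =====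
-- state = (prev, distinct): prev is None → Option Int, the running distinct count → Int
def solution_alt (nums : List Int) : Int :=
  let ordered := PySem.List.sorted nums (fun x => x) false
  let st := ordered.foldl
    (fun (st : Option Int × Int) x => (some x, if st.1 = some x then st.2 else st.2 + 1))
    ((none : Option Int), (0 : Int))
  min st.2 (PySem.Int.floordiv (nums.length : Int) 2)

-- ===== PRECONDITION & SPEC =====
def Spec_solution (nums : List Int) (out : Int) : Prop := out = solution_alt nums
instance (nums : List Int) (out : Int) : Decidable (Spec_solution nums out) := by unfold Spec_solution; infer_instance

-- ===== CLAIM (what is proved, stated in full; the proofs are below) =====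
def Claim_equal_solution : Prop := ∀ (nums : List Int), Dom_solution nums → Spec_solution nums (solution nums)

-- ===== LEMMAS AND PROOFS =====

-- A's dict keys are exactly set(nums) in first-insertion order
lemma solution_dict_keys (nums : List Int) :
    (nums.foldl
      (fun d species =>
        if d.contains species = false then d.insert species 1
        else d.insert species (d.getD species 0 + 1))
      (PySem.Dict.empty : PySem.Dict Int Int)).keys = PySem.Set.ofList nums := by
  have hf : (fun (d : PySem.Dict Int Int) species =>
        if d.contains species = false then d.insert species 1
        else d.insert species (d.getD species 0 + 1))
      = fun d species => d.insert species
          (if d.contains species = false then 1 else d.getD species 0 + 1) := by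
    funext d s
    exact (apply_ite (d.insert s) _ _ _).symm
  rw [hf, PySem.Dict.keys_foldl_insert]
  simp [PySem.Set.update_nil_left]

-- discard is filter (definitional)
lemma discard_eq_filter (s : List Int) (x : Int) :
    PySem.Set.discard s x = s.filter (fun y => !(y == x)) := rfl

-- B's scan over a sorted tail, starting after element p that bounds the tail from below
lemma solution_scan_aux (l : List Int) : ∀ (p c : Int), l.Pairwise (· ≤ ·) → (∀ y ∈ l, p ≤ y) →
    (l.foldl
      (fun (st : Option Int × Int) x => (some x, if st.1 = some x then st.2 else st.2 + 1))
      (some p, c)).2 = c + (((PySem.Set.ofList l).discard p).length : Int) := by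
  induction l with
  | nil => intro p c _ _; simp [PySem.Set.discard]
  | cons x t ih =>
    intro p c hpw hlb
    have hxt : ∀ y ∈ t, x ≤ y := (List.pairwise_cons.mp hpw).1
    have hpt : t.Pairwise (· ≤ ·) := (List.pairwise_cons.mp hpw).2
    by_cases hxp : p = x
    · subst hxp
      simp only [List.foldl_cons, if_true]
      rw [ih p c hpt (fun y hy => hxt y hy)]
      congr 2
      rw [PySem.Set.ofList_cons,
          discard_eq_filter (p :: (PySem.Set.ofList t).discard p) p, List.filter_cons,
          if_neg (by simp : ¬((!(p == p)) = true))]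
      rw [List.filter_eq_self.mpr]
      intro a ha
      have hap : a ≠ p := ((PySem.Set.mem_discard (PySem.Set.ofList t) p a).mp ha).2
      simp [hap]
    · have hne : (some p : Option Int) ≠ some x := by simp [hxp]
      simp only [List.foldl_cons]
      rw [if_neg hne, ih x (c + 1) hpt hxt]
      have hpx : p < x := lt_of_le_of_ne (hlb x (List.mem_cons_self ..)) hxp
      have hclean : ((PySem.Set.ofList t).discard x).filter (fun y => !(y == p))
          = (PySem.Set.ofList t).discard x := by
        rw [List.filter_eq_self]
        intro a ha
        have hat : a ∈ PySem.Set.ofList t ∧ a ≠ x := (PySem.Set.mem_discard (PySem.Set.ofList t) x a).mp ha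
        have : x < a := lt_of_le_of_ne (hxt a ((PySem.Set.mem_ofList t a).mp hat.1)) (Ne.symm hat.2)
        simp [show a ≠ p from by omega]
      rw [PySem.Set.ofList_cons,
          discard_eq_filter (x :: (PySem.Set.ofList t).discard x) p, List.filter_cons,
          if_pos (by simp [Ne.symm hxp] : (!(x == p)) = true),
          hclean, List.length_cons]
      push_cast
      ring

-- B's scan over a whole sorted list counts the distinct elements
lemma solution_scan_sorted (l : List Int) (hpw : l.Pairwise (· ≤ ·)) :
    (l.foldl
      (fun (st : Option Int × Int) x => (some x, if st.1 = some x then st.2 else st.2 + 1))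
      ((none : Option Int), (0 : Int))).2 = ((PySem.Set.ofList l).length : Int) := by
  cases l with
  | nil => simp
  | cons x t =>
    have hxt : ∀ y ∈ t, x ≤ y := (List.pairwise_cons.mp hpw).1
    have hpt : t.Pairwise (· ≤ ·) := (List.pairwise_cons.mp hpw).2
    simp only [List.foldl_cons]
    rw [show (if (none : Option Int) = some x then (0:Int) else 0 + 1) = 0 + 1 from by simp]
    rw [solution_scan_aux t x (0 + 1) hpt hxt, PySem.Set.ofList_cons]
    simp only [List.length_cons]
    push_cast
    ring

-- sorting does not change the set of elements, hence not the distinct count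
lemma solution_ofList_sorted_length (nums : List Int) :
    (PySem.Set.ofList (PySem.List.sorted nums (fun x => x) false)).length
      = (PySem.Set.ofList nums).length := by
  refine List.Perm.length_eq ?_
  rw [List.perm_ext_iff_of_nodup (PySem.Set.nodup_ofList _) (PySem.Set.nodup_ofList _)]
  intro a
  simp [PySem.Set.mem_ofList, PySem.List.mem_sorted]

-- ===== VERDICT (by name: the statement is the Claim_ definition above) =====
theorem solution_spec : Claim_equal_solution := by
  intro nums _
  unfold Spec_solution solution solution_alt
  have hsize : ((nums.foldl
      (fun d species =>
        if d.contains species = false then d.insert species 1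
        else d.insert species (d.getD species 0 + 1))
      (PySem.Dict.empty : PySem.Dict Int Int)).size : Int)
      = ((PySem.Set.ofList nums).length : Int) := by
    have hk := solution_dict_keys nums
    have h1 : (nums.foldl
      (fun d species =>
        if d.contains species = false then d.insert species 1
        else d.insert species (d.getD species 0 + 1))
      (PySem.Dict.empty : PySem.Dict Int Int)).keys.length
        = (nums.foldl
      (fun d species =>
        if d.contains species = false then d.insert species 1
        else d.insert species (d.getD species 0 + 1))
      (PySem.Dict.empty : PySem.Dict Int Int)).size := by
      simp [PySem.Dict.keys, PySem.Dict.size]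
    rw [hk] at h1
    exact_mod_cast h1.symm
  have hscan := solution_scan_sorted (PySem.List.sorted nums (fun x => x) false)
    (by simpa using PySem.List.sorted_pairwise nums (fun x => x))
  rw [solution_ofList_sorted_length] at hscan
  simp only [hsize, hscan]
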